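-- pv_equiv track=rewrite | github.com/Zor0000/KG_RAG_Project | retrieval/unified_retriever.py | infer_product_from_query
-- ===== SOURCE A (Python) =====
-- from typing import List, Dict, Optional
--
-- PRODUCT_KEYWORDS: Dict[str, List[str]] = {
--     "copilot_studio": [
--         "copilot studio", "copilot", "microsoft copilot",
--         "licensing", "license", "m365", "microsoft 365",
--         "teams", "outlook", "sharepoint", "power platform",
--         "power automate", "power apps", "power bi",
--         "business developer", "business user", "business development",
--         "lab", "labs", "hands-on", "exercise", "tutorial",
--         "learning path", "training", "workshop", "scenario",
--         "relevant", "recommend", "best for", "get started",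
--         "beginner", "intermediate", "advanced",
--     ],
--     "azure_bot_service": [
--         "azure bot", "bot service", "bot framework",
--         "azure", "direct line", "bot channel",
--     ],
--     "autogen": [
--         "autogen", "multi-agent", "agent framework",
--         "agentic", "agent orchestration",
--     ],
-- }
--
-- def infer_product_from_query(query: str) -> Optional[str]:
--     """
--     Scan the query for product-specific keywords.
--     Returns the inferred product name or None if ambiguous.
--     """
--     q = query.lower()
--     scores: Dict[str, int] = {p: 0 for p in PRODUCT_KEYWORDS}
--
--     for product, keywords in PRODUCT_KEYWORDS.items():
--         for kw in keywords:
--             if kw in q: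
--                 scores[product] += 1
--
--     ranked = sorted(scores.items(), key=lambda x: x[1], reverse=True)
--
--     if ranked[0][1] > 0 and (len(ranked) < 2 or ranked[0][1] > ranked[1][1]):
--         return ranked[0][0]
--
--     return None
-- ===== SOURCE B (Python) =====
-- from typing import List, Dict, Optional
--
-- PRODUCT_KEYWORDS: Dict[str, List[str]] = {
--     "copilot_studio": [
--         "copilot studio", "copilot", "microsoft copilot",
--         "licensing", "license", "m365", "microsoft 365",
--         "teams", "outlook", "sharepoint", "power platform",
--         "power automate", "power apps", "power bi",
--         "business developer", "business user", "business development",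
--         "lab", "labs", "hands-on", "exercise", "tutorial",
--         "learning path", "training", "workshop", "scenario",
--         "relevant", "recommend", "best for", "get started",
--         "beginner", "intermediate", "advanced",
--     ],
--     "azure_bot_service": [
--         "azure bot", "bot service", "bot framework",
--         "azure", "direct line", "bot channel",
--     ],
--     "autogen": [
--         "autogen", "multi-agent", "agent framework",
--         "agentic", "agent orchestration",
--     ],
-- }
--
-- def infer_product_from_query(query: str) -> Optional[str]:
--     """Single max-and-count scan instead of building a dict and sorting it."""
--     q = query.lower()
--     best_product: Optional[str] = None
--     best_score = 0
--     ties = 0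
--     for product, keywords in PRODUCT_KEYWORDS.items():
--         score = sum(1 for kw in keywords if kw in q)
--         if score > best_score:
--             best_product, best_score, ties = product, score, 1
--         elif score == best_score:
--             ties += 1
--     return best_product if best_score > 0 and ties == 1 else None
-- ===== Notes on version B (the rewrite author's own statement) =====
-- stated objective: simpler
-- what changed: Replaces the score dict plus stable sort-then-compare-top-two with a single max-and-count pass that tracks the first best product, its score and how many products reach it, returning it only when the positive maximum is unique.
import Mathlib
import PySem

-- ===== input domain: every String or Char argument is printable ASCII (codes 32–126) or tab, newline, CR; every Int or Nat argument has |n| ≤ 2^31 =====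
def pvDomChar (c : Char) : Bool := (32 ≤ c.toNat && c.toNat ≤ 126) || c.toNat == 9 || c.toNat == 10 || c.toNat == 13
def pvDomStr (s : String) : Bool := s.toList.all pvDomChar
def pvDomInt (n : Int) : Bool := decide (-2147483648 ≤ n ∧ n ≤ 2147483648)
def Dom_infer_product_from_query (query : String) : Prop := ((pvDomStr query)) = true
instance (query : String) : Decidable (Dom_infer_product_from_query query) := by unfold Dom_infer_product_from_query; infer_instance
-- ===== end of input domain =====

-- B replaces A's dict-of-scores + stable descending sort + top-two comparison by a single
-- max-and-count scan over the products (simpler; same observable behaviour on every input).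

def PRODUCT_KEYWORDS : List (String × List String) := [
  ("copilot_studio", [
    "copilot studio", "copilot", "microsoft copilot",
    "licensing", "license", "m365", "microsoft 365",
    "teams", "outlook", "sharepoint", "power platform",
    "power automate", "power apps", "power bi",
    "business developer", "business user", "business development",
    "lab", "labs", "hands-on", "exercise", "tutorial",
    "learning path", "training", "workshop", "scenario",
    "relevant", "recommend", "best for", "get started",
    "beginner", "intermediate", "advanced"]),
  ("azure_bot_service", [
    "azure bot", "bot service", "bot framework",
    "azure", "direct line", "bot channel"]),
  ("autogen", [
    "autogen", "multi-agent", "agent framework",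
    "agentic", "agent orchestration"])]

-- ===== PORT A =====
def infer_product_from_query (query : String) : Option String :=
  let q := PySem.Str.lower query
  let scores0 : PySem.Dict String Int :=
    PySem.Dict.ofList (PRODUCT_KEYWORDS.map (fun p => (p.1, 0)))
  let scores := PRODUCT_KEYWORDS.foldl (fun sc pk =>
      pk.2.foldl (fun sc kw =>
        if PySem.Str.isIn kw q then sc.modify pk.1 0 (· + 1) else sc) sc) scores0
  let ranked := PySem.List.sorted scores.items (fun x => x.2) true
  -- ranked[0]/ranked[1]: ranked always has the 3 products, so pyGetD is exact here
  let r0 := PySem.List.pyGetD ranked 0 ("", 0)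
  if r0.2 > 0 && (decide ((ranked.length : Int) < 2) ||
                  decide (r0.2 > (PySem.List.pyGetD ranked 1 ("", 0)).2))
  then some r0.1 else none

-- ===== PORT B =====
def infer_product_from_query_alt (query : String) : Option String :=
  let q := PySem.Str.lower query
  let st := PRODUCT_KEYWORDS.foldl
    (fun (st : Option String × Int × Int) pk =>
      let score : Int := (pk.2.countP (fun kw => PySem.Str.isIn kw q) : Int)
      if score > st.2.1 then (some pk.1, score, 1)
      else if score = st.2.1 then (st.1, st.2.1, st.2.2 + 1)
      else st)
    (none, 0, 0)
  if st.2.1 > 0 && st.2.2 == 1 then st.1 else none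

-- ===== PRECONDITION & SPEC =====
def Spec_infer_product_from_query (query : String) (out : Option String) : Prop := out = infer_product_from_query_alt query
instance (query : String) (out : Option String) : Decidable (Spec_infer_product_from_query query out) := by unfold Spec_infer_product_from_query; infer_instance

-- ===== CLAIM (what is proved, stated in full; the proofs are below) =====
def Claim_equal_infer_product_from_query : Prop := ∀ (query : String), Dom_infer_product_from_query query → Spec_infer_product_from_query query (infer_product_from_query query)

-- ===== LEMMAS AND PROOFS =====

-- A's inner keyword loop: effect on any lookup is "+ count of hits" at the product's key.
theorem inner_getD (q p v : String) (kws : List String) (sc : PySem.Dict String Int) :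
    (kws.foldl (fun sc kw =>
        if PySem.Str.isIn kw q then sc.modify p 0 (· + 1) else sc) sc).getD v 0
    = sc.getD v 0 + (if v = p then (kws.countP (fun kw => PySem.Str.isIn kw q) : Int) else 0) := by
  induction kws generalizing sc with
  | nil => simp
  | cons kw kws ih =>
    simp only [List.foldl_cons, List.countP_cons]
    by_cases h : PySem.Str.isIn kw q = true
    · simp only [h, if_true, ih, PySem.Dict.getD_modify]
      by_cases hv : v = p <;> simp [hv] <;> omega
    · simp only [h, ih]
      by_cases hv : v = p <;> simp [hv]

-- A's inner keyword loop keeps the key set when the product is already a key.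
theorem inner_keys (q p : String) (kws : List String) (sc : PySem.Dict String Int)
    (h : sc.contains p = true) :
    (kws.foldl (fun sc kw =>
        if PySem.Str.isIn kw q then sc.modify p 0 (· + 1) else sc) sc).keys = sc.keys := by
  induction kws generalizing sc with
  | nil => rfl
  | cons kw kws ih =>
    simp only [List.foldl_cons]
    by_cases hk : PySem.Str.isIn kw q = true
    · rw [if_pos hk, ih _ (by simp [PySem.Dict.contains_modify, h]),
          PySem.Dict.keys_modify, PySem.Dict.keys_insert_of_contains _ _ h]
    · rw [if_neg hk, ih _ h]

-- The tail of A (sort 3 scored products, take a unique positive top) agrees with the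
-- tail of B (max-and-count over the same 3 scores), for arbitrary scores.
-- proof-only: the two tails of the ports, as functions of the three hit counts
def pvLhs (c1 c2 c3 : Nat) : Option String :=
    (let ranked := PySem.List.sorted
        [("copilot_studio", (c1 : Int)), ("azure_bot_service", (c2 : Int)),
         ("autogen", (c3 : Int))] (fun x => x.2) true
     let r0 := PySem.List.pyGetD ranked 0 ("", 0)
     if r0.2 > 0 && (decide ((ranked.length : Int) < 2) ||
                     decide (r0.2 > (PySem.List.pyGetD ranked 1 ("", 0)).2))
     then some r0.1 else none)
def pvRhs (c1 c2 c3 : Nat) : Option String :=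
    (let st := [("copilot_studio", (c1 : Int)), ("azure_bot_service", (c2 : Int)),
                  ("autogen", (c3 : Int))].foldl
        (fun (st : Option String × Int × Int) pk =>
          if pk.2 > st.2.1 then (some pk.1, pk.2, 1)
          else if pk.2 = st.2.1 then (st.1, st.2.1, st.2.2 + 1)
          else st)
        (none, 0, 0)
       if st.2.1 > 0 && st.2.2 == 1 then st.1 else none)

-- hit counts are bounded by the keyword-list lengths, so the tails agree by finite check
set_option maxHeartbeats 2000000 in
theorem core_eq : ∀ c1 < 34, ∀ c2 < 7, ∀ c3 < 6, pvLhs c1 c2 c3 = pvRhs c1 c2 c3 := by decide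

-- proof-only abbreviations: the three keyword lists and a product's hit count
def pvK1 : List String :=
  ["copilot studio", "copilot", "microsoft copilot",
   "licensing", "license", "m365", "microsoft 365",
   "teams", "outlook", "sharepoint", "power platform",
   "power automate", "power apps", "power bi",
   "business developer", "business user", "business development",
   "lab", "labs", "hands-on", "exercise", "tutorial",
   "learning path", "training", "workshop", "scenario",
   "relevant", "recommend", "best for", "get started",
   "beginner", "intermediate", "advanced"]
def pvK2 : List String :=
  ["azure bot", "bot service", "bot framework",
   "azure", "direct line", "bot channel"]
def pvK3 : List String :=
  ["autogen", "multi-agent", "agent framework",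
   "agentic", "agent orchestration"]
def pvC (kws : List String) (q : String) : Nat :=
  kws.countP (fun kw => PySem.Str.isIn kw q)

-- A's score dict, as the literal 3-item association list of hit counts.
theorem scores_items (q : String) :
    (PRODUCT_KEYWORDS.foldl (fun sc pk =>
        pk.2.foldl (fun sc kw =>
          if PySem.Str.isIn kw q then sc.modify pk.1 0 (· + 1) else sc) sc)
      (PySem.Dict.ofList (PRODUCT_KEYWORDS.map (fun p => (p.1, 0))))).items
    = [("copilot_studio", (pvC pvK1 q : Int)), ("azure_bot_service", (pvC pvK2 q : Int)),
       ("autogen", (pvC pvK3 q : Int))] := by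
  have hPK : PRODUCT_KEYWORDS =
      [("copilot_studio", pvK1), ("azure_bot_service", pvK2), ("autogen", pvK3)] := rfl
  rw [hPK]
  simp only [List.foldl_cons, List.foldl_nil, List.map_cons, List.map_nil]
  set sc0 : PySem.Dict String Int :=
    PySem.Dict.ofList [("copilot_studio", 0), ("azure_bot_service", 0), ("autogen", 0)] with hsc0
  have hk0 : sc0.keys = ["copilot_studio", "azure_bot_service", "autogen"] := by decide
  set d1 := pvK1.foldl (fun sc kw =>
      if PySem.Str.isIn kw q then sc.modify "copilot_studio" 0 (· + 1) else sc) sc0 with hd1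
  set d2 := pvK2.foldl (fun sc kw =>
      if PySem.Str.isIn kw q then sc.modify "azure_bot_service" 0 (· + 1) else sc) d1 with hd2
  set d3 := pvK3.foldl (fun sc kw =>
      if PySem.Str.isIn kw q then sc.modify "autogen" 0 (· + 1) else sc) d2 with hd3
  have hk1 : d1.keys = sc0.keys := by
    rw [hd1]; exact inner_keys q _ _ _ (by decide)
  have hk2 : d2.keys = sc0.keys := by
    rw [hd2]
    rw [inner_keys q _ _ _ (by
      exact (PySem.Dict.contains_iff_mem_keys _ _).mpr (by rw [hk1, hk0]; simp))]
    exact hk1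
  have hk3 : d3.keys = sc0.keys := by
    rw [hd3]
    rw [inner_keys q _ _ _ (by
      exact (PySem.Dict.contains_iff_mem_keys _ _).mpr (by rw [hk2, hk0]; simp))]
    exact hk2
  have hnd : d3.keys.Nodup := by rw [hk3, hk0]; decide
  rw [PySem.Dict.items_eq_map_keys d3 hnd 0, hk3, hk0]
  have g1 : d3.getD "copilot_studio" 0 = (pvC pvK1 q : Int) := by
    rw [hd3, inner_getD, hd2, inner_getD, hd1, inner_getD]
    rw [if_pos rfl, if_neg (by decide), if_neg (by decide)]
    show (0 : Int) + _ + 0 + 0 = _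
    simp [pvC]
  have g2 : d3.getD "azure_bot_service" 0 = (pvC pvK2 q : Int) := by
    rw [hd3, inner_getD, hd2, inner_getD, hd1, inner_getD]
    rw [if_neg (by decide), if_pos rfl, if_neg (by decide)]
    show (0 : Int) + 0 + _ + 0 = _
    simp [pvC]
  have g3 : d3.getD "autogen" 0 = (pvC pvK3 q : Int) := by
    rw [hd3, inner_getD, hd2, inner_getD, hd1, inner_getD]
    rw [if_neg (by decide), if_neg (by decide), if_pos rfl]
    show (0 : Int) + 0 + 0 + _ = _
    simp [pvC]
  simp [g1, g2, g3]

-- ===== VERDICT (by name: the statement is the Claim_ definition above) =====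
set_option maxHeartbeats 1000000 in
theorem infer_product_from_query_spec : Claim_equal_infer_product_from_query := by
  intro query _
  unfold Spec_infer_product_from_query
  have hA : infer_product_from_query query
      = pvLhs (pvC pvK1 (PySem.Str.lower query)) (pvC pvK2 (PySem.Str.lower query))
          (pvC pvK3 (PySem.Str.lower query)) := by
    simp only [infer_product_from_query]
    rw [scores_items]
    simp only [pvLhs]
  have hB : infer_product_from_query_alt query
      = pvRhs (pvC pvK1 (PySem.Str.lower query)) (pvC pvK2 (PySem.Str.lower query))
          (pvC pvK3 (PySem.Str.lower query)) := by
    have hPK : PRODUCT_KEYWORDS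
        = [("copilot_studio", pvK1), ("azure_bot_service", pvK2), ("autogen", pvK3)] := rfl
    simp only [infer_product_from_query_alt, pvRhs, pvC, hPK, List.foldl_cons, List.foldl_nil]
  rw [hA, hB]
  exact core_eq _ (Nat.lt_succ_of_le (le_trans List.countP_le_length (by decide)))
    _ (Nat.lt_succ_of_le (le_trans List.countP_le_length (by decide)))
    _ (Nat.lt_succ_of_le (le_trans List.countP_le_length (by decide)))
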